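-- pv_equiv track=rewrite | github.com/H2020-newTRENDs/FLEX | flex_behavior/activity-prediction/markov_model.py | count_occurences_in_list
-- ===== SOURCE A (Python) =====
-- import itertools
--
-- def count_occurences_in_list(
--
--         activities: "List[int]"
-- ) -> "List[Tuple[int, int, int]]":  # Start Position, Item, Duration
--     act_duration = []
--     pos = 0
--     for key, iter in itertools.groupby(activities):
--         l = len(list(iter))
--         act_duration.append((pos, key, l))
--         pos += l
--     return act_duration
-- ===== SOURCE B (Python) =====
-- def count_occurences_in_list(
--         activities: "List[int]"
-- ) -> "List[Tuple[int, int, int]]":  # Start Position, Item, Duration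
--     n = len(activities)
--     bounds = [i for i in range(n) if i == 0 or activities[i] != activities[i - 1]]
--     bounds.append(n)
--     return [(b, activities[b], e - b) for b, e in zip(bounds, bounds[1:])]
-- ===== Notes on version B (the rewrite author's own statement) =====
-- stated objective: alternative
-- what changed: Replaced the itertools.groupby streaming pass with a staged index-based computation: first collect run-boundary indices (i==0 or activities[i]!=activities[i-1]) plus the sentinel n, then zip consecutive boundaries into (start, value, length) triples.
import Mathlib
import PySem

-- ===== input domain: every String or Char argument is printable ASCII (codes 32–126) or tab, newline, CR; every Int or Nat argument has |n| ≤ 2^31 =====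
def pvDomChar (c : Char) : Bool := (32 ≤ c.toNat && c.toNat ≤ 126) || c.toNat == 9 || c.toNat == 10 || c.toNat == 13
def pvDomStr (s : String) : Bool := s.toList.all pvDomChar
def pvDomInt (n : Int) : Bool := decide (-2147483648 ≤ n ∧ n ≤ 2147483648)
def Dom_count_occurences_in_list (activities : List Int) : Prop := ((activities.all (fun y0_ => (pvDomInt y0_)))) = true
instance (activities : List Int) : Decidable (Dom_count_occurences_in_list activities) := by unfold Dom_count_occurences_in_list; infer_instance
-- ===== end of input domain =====

-- B replaces the itertools.groupby streaming pass with a staged computation: collect the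
-- run-boundary indices, then zip consecutive boundaries into triples (objective: alternative).

-- ===== PORT A =====
-- itertools.groupby: successive (key, run-length) groups of equal adjacent elements
def pvGroupby : List Int → List (Int × Int)
  | [] => []
  | x :: xs => (x, 1 + ((xs.takeWhile (· == x)).length : Int)) :: pvGroupby (xs.dropWhile (· == x))
termination_by l => l.length
decreasing_by
  simp only [List.length_cons]
  exact Nat.lt_succ_of_le (List.length_dropWhile_le _ _)

def count_occurences_in_list (activities : List Int) : List (Int × Int × Int) :=
  ((pvGroupby activities).foldl
    (fun (st : List (Int × Int × Int) × Int) kl =>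
      (st.1 ++ [(st.2, kl.1, kl.2)], st.2 + kl.2)) ([], 0)).1

-- ===== PORT B =====
-- Source B: boundary indices [i for i in range(n) if i == 0 or a[i] != a[i-1]] + [n],
-- then [(b, a[b], e - b) for b, e in zip(bounds, bounds[1:])]
def count_occurences_in_list_alt (activities : List Int) : List (Int × Int × Int) :=
  let n := activities.length
  let bounds := ((List.range n).filter
      (fun i => i == 0 || !(activities.getD i 0 == activities.getD (i - 1) 0))) ++ [n]
  (bounds.zip bounds.tail).map
    (fun p => ((p.1 : Int), activities.getD p.1 0, (p.2 : Int) - (p.1 : Int)))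

-- ===== PRECONDITION & SPEC =====
def Spec_count_occurences_in_list (activities : List Int) (out : List (Int × Int × Int)) : Prop := out = count_occurences_in_list_alt activities
instance (activities : List Int) (out : List (Int × Int × Int)) : Decidable (Spec_count_occurences_in_list activities out) := by unfold Spec_count_occurences_in_list; infer_instance

-- ===== CLAIM (what is proved, stated in full; the proofs are below) =====
def Claim_equal_count_occurences_in_list : Prop := ∀ (activities : List Int), Dom_count_occurences_in_list activities → Spec_count_occurences_in_list activities (count_occurences_in_list activities)

-- ===== LEMMAS AND PROOFS =====

-- direct (non-accumulator) form of A's emission loop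
def pvEmit : List (Int × Int) → Int → List (Int × Int × Int)
  | [], _ => []
  | (k, l) :: gs, pos => (pos, k, l) :: pvEmit gs (pos + l)

theorem pvFoldA_eq_emit (gs : List (Int × Int)) (res : List (Int × Int × Int)) (pos : Int) :
    (gs.foldl (fun (st : List (Int × Int × Int) × Int) kl =>
      (st.1 ++ [(st.2, kl.1, kl.2)], st.2 + kl.2)) (res, pos)).1 = res ++ pvEmit gs pos := by
  induction gs generalizing res pos with
  | nil => simp [pvEmit]
  | cons kl gs ih =>
      obtain ⟨k, l⟩ := kl
      simp [List.foldl, pvEmit, ih]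

theorem pvGroupby_cons (x : Int) (xs : List Int) :
    pvGroupby (x :: xs) =
      (x, 1 + ((xs.takeWhile (· == x)).length : Int)) :: pvGroupby (xs.dropWhile (· == x)) := by
  rw [pvGroupby.eq_def]

theorem pvEmit_shift (gs : List (Int × Int)) (c pos : Int) :
    pvEmit gs (c + pos) = (pvEmit gs pos).map (fun r => (c + r.1, r.2.1, r.2.2)) := by
  induction gs generalizing pos with
  | nil => simp [pvEmit]
  | cons kl gs ih =>
      obtain ⟨k, l⟩ := kl
      simp [pvEmit, ← ih, add_assoc]

-- B's boundary predicate and boundary list, named for the proofs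
def pvPred (a : List Int) (i : Nat) : Bool := i == 0 || !(a.getD i 0 == a.getD (i - 1) 0)

def pvBounds (a : List Int) : List Nat :=
  ((List.range a.length).filter (pvPred a)) ++ [a.length]

theorem pvAlt_eq (a : List Int) :
    count_occurences_in_list_alt a =
      ((pvBounds a).zip (pvBounds a).tail).map
        (fun p => ((p.1 : Int), a.getD p.1 0, (p.2 : Int) - (p.1 : Int))) := rfl

theorem pvGetD_all_eq (x : Int) (l : List Int) (hall : ∀ y ∈ l, y = x) (i : Nat)
    (hi : i < l.length) : l.getD i 0 = x := by
  rw [List.getD_eq_getElem l 0 hi]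
  exact hall _ (List.getElem_mem hi)

theorem pvTakeWhile_all (x : Int) (xs : List Int) :
    ∀ y ∈ xs.takeWhile (· == x), y = x := by
  intro y hy
  simpa using List.mem_takeWhile_imp hy

-- every element of the initial run x :: takeWhile equals x
theorem pvRun_getD (x : Int) (xs : List Int) (i : Nat)
    (hi : i < (xs.takeWhile (· == x)).length + 1) : (x :: xs).getD i 0 = x := by
  cases i with
  | zero => rfl
  | succ j =>
      have hj : j < (xs.takeWhile (· == x)).length := by omega
      have hxs : (x :: xs).getD (j + 1) 0 = xs.getD j 0 := rfl
      rw [hxs]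
      conv_lhs => rw [← List.takeWhile_append_dropWhile (p := (· == x)) (l := xs)]
      rw [List.getD_append _ _ _ _ hj]
      exact pvGetD_all_eq x _ (pvTakeWhile_all x xs) j hj

theorem pvGetD_shift (x : Int) (xs : List Int) (j : Nat) :
    (x :: xs).getD ((xs.takeWhile (· == x)).length + 1 + j) 0
      = (xs.dropWhile (· == x)).getD j 0 := by
  have hl : (x :: xs.takeWhile (· == x)).length = (xs.takeWhile (· == x)).length + 1 := by
    simp
  have h := List.getD_append_right (x :: xs.takeWhile (· == x)) (xs.dropWhile (· == x)) 0
    ((xs.takeWhile (· == x)).length + 1 + j) (by rw [hl]; omega)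
  rw [hl] at h
  have he : (xs.takeWhile (· == x)).length + 1 + j - ((xs.takeWhile (· == x)).length + 1) = j := by
    omega
  rw [he] at h
  have hsplit : (x :: xs.takeWhile (· == x)) ++ xs.dropWhile (· == x) = x :: xs := by
    rw [List.cons_append, List.takeWhile_append_dropWhile]
  rw [hsplit] at h
  exact h

-- head of dropWhile fails the predicate
theorem pvDropWhile_getD0 (x : Int) (xs : List Int) (hne : xs.dropWhile (· == x) ≠ []) :
    (((xs.dropWhile (· == x)).getD 0 0) == x) = false := by
  have h2 := List.head_dropWhile_not (fun y : Int => y == x) (l := xs) hne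
  cases hc : xs.dropWhile (· == x) with
  | nil => exact absurd hc hne
  | cons h tl =>
      simp only [hc, List.head_cons] at h2
      simpa using h2

-- the decomposition of B's boundary list along the first run
theorem pvBounds_cons (x : Int) (xs : List Int) :
    pvBounds (x :: xs) =
      0 :: (pvBounds (xs.dropWhile (· == x))).map
            (fun j => (xs.takeWhile (· == x)).length + 1 + j) := by
  set t := xs.takeWhile (· == x) with ht
  set d := xs.dropWhile (· == x) with hd
  have hlen0 : t.length + d.length = xs.length := by
    rw [ht, hd, ← List.length_append, List.takeWhile_append_dropWhile]
  have hlen : (x :: xs).length = (t.length + 1) + d.length := by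
    simp [List.length_cons]; omega
  have hrange : List.range ((t.length + 1) + d.length)
      = List.range (t.length + 1) ++ (List.range d.length).map (fun j => (t.length + 1) + j) :=
    List.range_add
  -- on the first run only index 0 is a boundary
  have h1 : (List.range (t.length + 1)).filter (pvPred (x :: xs)) = [0] := by
    rw [List.range_succ_eq_map, List.filter_cons]
    have h0 : pvPred (x :: xs) 0 = true := by simp [pvPred]
    rw [if_pos h0]
    congr 1
    rw [List.filter_eq_nil_iff]
    intro i hi
    simp only [List.mem_map, List.mem_range] at hi
    obtain ⟨j, hj, rfl⟩ := hi
    have e1 : (x :: xs).getD (j + 1) 0 = x := pvRun_getD x xs (j + 1) (by rw [← ht]; omega)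
    have e2 : (x :: xs).getD j 0 = x := pvRun_getD x xs j (by rw [← ht]; omega)
    have : pvPred (x :: xs) (j + 1) = false := by
      simp only [pvPred, Nat.add_sub_cancel, e1, e2]
      simp
    simp [Nat.succ_eq_add_one, this]
  -- past the first run the boundary predicate is d's, shifted
  have h2 : ((List.range d.length).map (fun j => (t.length + 1) + j)).filter (pvPred (x :: xs))
      = ((List.range d.length).filter (pvPred d)).map (fun j => (t.length + 1) + j) := by
    rw [List.filter_map]
    congr 1
    apply List.filter_congr
    intro j hj
    simp only [List.mem_range] at hj
    have hs : ∀ m, (x :: xs).getD ((t.length + 1) + m) 0 = d.getD m 0 := by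
      intro m; rw [hd, ht]; exact pvGetD_shift x xs m
    show pvPred (x :: xs) ((t.length + 1) + j) = pvPred d j
    cases j with
    | zero =>
        have hdne : d ≠ [] := List.ne_nil_of_length_pos (by omega)
        have hhead : ((d.getD 0 0) == x) = false := pvDropWhile_getD0 x xs hdne
        have e1 : (x :: xs).getD ((t.length + 1) + 0) 0 = d.getD 0 0 := hs 0
        have e2 : (x :: xs).getD ((t.length + 1) + 0 - 1) 0 = x := by
          have hq : (t.length + 1) + 0 - 1 = t.length := by omega
          rw [hq]; rw [ht]; exact pvRun_getD x xs (xs.takeWhile (· == x)).length (by omega)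
        simp only [pvPred, e1, e2, hhead]
        simp
    | succ j' =>
        have e1 : (x :: xs).getD ((t.length + 1) + (j' + 1)) 0 = d.getD (j' + 1) 0 := hs (j' + 1)
        have e2 : (x :: xs).getD ((t.length + 1) + (j' + 1) - 1) 0 = d.getD j' 0 := by
          have hq : (t.length + 1) + (j' + 1) - 1 = (t.length + 1) + j' := by omega
          rw [hq]; exact hs j'
        simp only [pvPred, e1, e2, Nat.add_sub_cancel]
        simp
  rw [pvBounds, hlen, hrange, List.filter_append, h1, h2, pvBounds]
  rw [List.map_append]
  simp

-- B's boundary list always starts with 0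
theorem pvBounds_zero (l : List Int) : ∃ cs, pvBounds l = 0 :: cs := by
  cases l with
  | nil => exact ⟨[], rfl⟩
  | cons h tl =>
      refine ⟨((List.range tl.length).map Nat.succ).filter (pvPred (h :: tl))
        ++ [(h :: tl).length], ?_⟩
      rw [pvBounds, List.length_cons, List.range_succ_eq_map, List.filter_cons]
      have h0 : pvPred (h :: tl) 0 = true := by simp [pvPred]
      rw [if_pos h0]
      simp

-- main bridge: B's staged computation equals the direct emission of A's groups
theorem pvAlt_eq_emit (a : List Int) :
    count_occurences_in_list_alt a = pvEmit (pvGroupby a) 0 := by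
  induction a using pvGroupby.induct with
  | case1 => simp [count_occurences_in_list_alt, pvGroupby, pvEmit]
  | case2 x xs ih =>
      obtain ⟨cs, hcs⟩ := pvBounds_zero (xs.dropWhile (· == x))
      rw [pvAlt_eq, pvBounds_cons, hcs]
      rw [pvAlt_eq, hcs] at ih
      simp only [List.tail_cons] at ih
      rw [pvGroupby_cons]
      simp only [List.map_cons, List.tail_cons, List.zip_cons_cons, pvEmit]
      congr 1
      · simp only [Prod.mk.injEq]
        refine ⟨by norm_num, rfl, by push_cast; ring⟩
      · rw [← List.map_cons, List.zip_map, List.map_map]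
        have hc : (0 : Int) + (1 + ((xs.takeWhile (· == x)).length : Int))
            = (1 + ((xs.takeWhile (· == x)).length : Int)) + 0 := by ring
        rw [hc, pvEmit_shift, ← ih, List.map_map]
        apply List.map_congr_left
        intro p _
        obtain ⟨p1, p2⟩ := p
        simp only [Function.comp, Prod.map, Prod.mk.injEq]
        have g : (x :: xs).getD ((xs.takeWhile (· == x)).length + 1 + p1) 0
            = (xs.dropWhile (· == x)).getD p1 0 := pvGetD_shift x xs p1
        refine ⟨by push_cast; ring, g, by push_cast; ring⟩

-- ===== VERDICT (by name: the statement is the Claim_ definition above) =====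
theorem count_occurences_in_list_spec : Claim_equal_count_occurences_in_list := by
  intro activities _
  unfold Spec_count_occurences_in_list
  rw [pvAlt_eq_emit]
  unfold count_occurences_in_list
  rw [pvFoldA_eq_emit]
  simp
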